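-- pv_equiv track=rewrite | github.com/tl5275/fmcw-radar-pipeline | build_microdoppler_dataset.py | detect_delimiter
-- ===== SOURCE A (Python) =====
-- def detect_delimiter(lines: list[str]) -> str:
--     candidates = [",", "\t", ";"]
--     best_delimiter = ","
--     best_score = -1
--     for delimiter in candidates:
--         score = sum(line.count(delimiter) for line in lines[:50])
--         if score > best_score:
--             best_score = score
--             best_delimiter = delimiter
--     return best_delimiter
-- ===== SOURCE B (Python) =====
-- def detect_delimiter(lines: list[str]) -> str:
--     counts = {}
--     for line in lines[:50]:
--         for ch in line:
--             counts[ch] = counts.get(ch, 0) + 1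
--     return max([",", "\t", ";"], key=lambda c: counts.get(c, 0))
-- ===== Notes on version B (the rewrite author's own statement) =====
-- stated objective: alternative
-- what changed: B builds one character-frequency dict over the first 50 lines in a single pass and picks the candidate by a first-maximal argmax (max with key), instead of A's per-candidate str.count scans with a running best/score accumulator.
import Mathlib
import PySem

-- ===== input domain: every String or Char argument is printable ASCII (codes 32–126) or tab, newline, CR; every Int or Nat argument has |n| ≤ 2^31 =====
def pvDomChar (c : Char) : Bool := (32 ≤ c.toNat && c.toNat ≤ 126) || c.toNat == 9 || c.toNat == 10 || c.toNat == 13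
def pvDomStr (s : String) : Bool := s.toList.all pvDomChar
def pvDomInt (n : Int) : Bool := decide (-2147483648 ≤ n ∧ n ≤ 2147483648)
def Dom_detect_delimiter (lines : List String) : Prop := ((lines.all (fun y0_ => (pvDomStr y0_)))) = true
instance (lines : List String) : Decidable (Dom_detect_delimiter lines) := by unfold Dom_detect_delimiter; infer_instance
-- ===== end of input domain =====

-- B replaces A's three per-candidate str.count scans by one character-frequency dict built in a single pass plus a first-maximal argmax (alternative decomposition, same result).

-- ===== PORT A =====
def detect_delimiter (lines : List String) : String :=
  let candidates : List String := [",", "\t", ";"]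
  let r := candidates.foldl (fun (st : String × Int) delimiter =>
    let score : Int :=
      ((PySem.List.slice lines none (some 50)).map
        (fun line => (PySem.Str.count line delimiter : Int))).sum
    if st.2 < score then (delimiter, score) else st) (",", -1)
  r.1

-- ===== PORT B =====
-- The 1-char Python strings obtained by iterating a line are represented as String.ofList [ch].
def detect_delimiter_alt (lines : List String) : String :=
  let counts : PySem.Dict String Int :=
    (PySem.List.slice lines none (some 50)).foldl
      (fun d line => line.toList.foldl
        (fun d ch => d.insert (String.ofList [ch]) (d.getD (String.ofList [ch]) 0 + 1)) d)
      PySem.Dict.empty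
  -- max([...], key=...) over a nonempty literal list; the default of maxD is unreachable
  PySem.List.maxD [",", "\t", ";"] (fun c => counts.getD c 0) ","

-- ===== PRECONDITION & SPEC =====
def Spec_detect_delimiter (lines : List String) (out : String) : Prop := out = detect_delimiter_alt lines
instance (lines : List String) (out : String) : Decidable (Spec_detect_delimiter lines out) := by unfold Spec_detect_delimiter; infer_instance

-- ===== CLAIM (what is proved, stated in full; the proofs are below) =====
def Claim_equal_detect_delimiter : Prop := ∀ (lines : List String), Dom_detect_delimiter lines → Spec_detect_delimiter lines (detect_delimiter lines)

-- ===== LEMMAS AND PROOFS =====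

-- Python str.count with a single-character needle counts occurrences of that character.
theorem count_go_single (c : Char) : ∀ (l : List Char) (fuel : Nat) (acc : Nat),
    l.length ≤ fuel → PySem.Chars.count.go [c] fuel l acc = acc + l.count c := by
  intro l
  induction l with
  | nil => intro fuel acc h; cases fuel <;> simp [PySem.Chars.count.go]
  | cons h t ih =>
    intro fuel acc hle
    cases fuel with
    | zero => simp at hle
    | succ f =>
      have ht : t.length ≤ f := by simpa using hle
      by_cases hc : h = c
      · subst hc
        simp [PySem.Chars.count.go, List.isPrefixOf, ih f (acc + 1) ht]
        omega
      · simp [PySem.Chars.count.go, List.isPrefixOf, hc, ih f acc ht, Ne.symm hc]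

theorem chars_count_single (cs : List Char) (c : Char) :
    PySem.Chars.count cs [c] = cs.count c := by
  simp [PySem.Chars.count, count_go_single c cs cs.length 0 le_rfl]

theorem ofList_single_injective : Function.Injective (fun ch => String.ofList [ch]) := by
  intro a b h
  have := congrArg String.toList h
  simpa using this

-- The nested character-counting fold of B, read at a single-character key.
theorem getD_nested (L : List String) (d : PySem.Dict String Int) (v : Char) :
    (L.foldl (fun d line => line.toList.foldl
        (fun d ch => d.insert (String.ofList [ch]) (d.getD (String.ofList [ch]) 0 + 1)) d) d).getD
      (String.ofList [v]) 0
    = d.getD (String.ofList [v]) 0 + (L.map (fun line => (line.toList.count v : Int))).sum := by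
  induction L generalizing d with
  | nil => simp
  | cons s t ih =>
    simp only [List.foldl_cons, ih, List.map_cons, List.sum_cons]
    have h1 : s.toList.foldl
        (fun d ch => d.insert (String.ofList [ch]) (d.getD (String.ofList [ch]) 0 + 1)) d
      = (s.toList.map (fun ch => String.ofList [ch])).foldl
        (fun d x => d.insert x (d.getD x 0 + 1)) d := by
      rw [List.foldl_map]
    rw [h1, PySem.Dict.getD_foldl_insert_add_one]
    have h2 : (s.toList.map (fun ch => String.ofList [ch])).count (String.ofList [v])
        = s.toList.count v :=
      List.count_map_of_injective _ _ ofList_single_injective _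
    rw [h2]; ring

-- B's dict lookup at a candidate equals A's per-candidate score.
theorem key_eval (lines : List String) (v : Char) :
    ((PySem.List.slice lines none (some 50)).foldl
      (fun d line => line.toList.foldl
        (fun d ch => d.insert (String.ofList [ch]) (d.getD (String.ofList [ch]) 0 + 1)) d)
      (PySem.Dict.empty : PySem.Dict String Int)).getD (String.ofList [v]) 0
    = ((PySem.List.slice lines none (some 50)).map
        (fun line => (PySem.Str.count line (String.ofList [v]) : Int))).sum := by
  rw [getD_nested]
  simp [PySem.Str.count_eq, chars_count_single]

-- ===== VERDICT (by name: the statement is the Claim_ definition above) =====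
theorem detect_delimiter_spec : Claim_equal_detect_delimiter := by
  intro lines _
  unfold Spec_detect_delimiter detect_delimiter detect_delimiter_alt
  simp only [List.foldl, PySem.List.maxD, PySem.List.max?]
  have e1 : ("," : String) = String.ofList [','] := by decide
  have e2 : ("\t" : String) = String.ofList ['\t'] := by decide
  have e3 : (";" : String) = String.ofList [';'] := by decide
  set s1 := ((PySem.List.slice lines none (some 50)).map
        (fun line => (PySem.Str.count line "," : Int))).sum with hs1
  set s2 := ((PySem.List.slice lines none (some 50)).map
        (fun line => (PySem.Str.count line "\t" : Int))).sum with hs2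
  set s3 := ((PySem.List.slice lines none (some 50)).map
        (fun line => (PySem.Str.count line ";" : Int))).sum with hs3
  set dct := (PySem.List.slice lines none (some 50)).foldl
      (fun d line => line.toList.foldl
        (fun d ch => d.insert (String.ofList [ch]) (d.getD (String.ofList [ch]) 0 + 1)) d)
      (PySem.Dict.empty : PySem.Dict String Int) with hdct
  have hd1 : dct.getD "," 0 = s1 := by rw [hdct, hs1, e1]; exact key_eval lines ','
  have hd2 : dct.getD "\t" 0 = s2 := by rw [hdct, hs2, e2]; exact key_eval lines '\t'
  have hd3 : dct.getD ";" 0 = s3 := by rw [hdct, hs3, e3]; exact key_eval lines ';'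
  have h1 : (0:Int) ≤ s1 := by rw [hs1]; exact List.sum_nonneg (by simp)
  simp only [hd1, hd2, hd3]
  rw [if_pos (by omega : (-1:Int) < s1)]
  by_cases c2 : s1 < s2
  · simp only [c2, if_pos]
    simp only [hd2]
    by_cases c3 : s2 < s3 <;> simp [c3]
  · simp only [c2, if_false]
    simp only [hd1]
    by_cases c3 : s1 < s3 <;> simp [c3]
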